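-- pv_equiv track=rewrite | github.com/HyunSoo-Lee/Coding-Test-Practice | 4th week/2021kakoBlind.py | solution
-- ===== SOURCE A (Python) =====
-- def solution(s):
--     dict = {
--         '0' : 'zero',
--         '1' : 'one',
--         '2' : 'two',
--         '3' : 'three',
--         '4' : 'four',
--         '5' : 'five',
--         '6' : 'six',
--         '7' : 'seven',
--         '8' : 'eight',
--         '9' : 'nine',
--     }
--
--     for key, val in dict.items():
--         if s.find(val) != -1:
--             s = s.replace(val, key)
--
--     answer = int(s)
--
--     return answer
--
-- s = 'one4seveneight'
-- ===== SOURCE B (Python) =====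
-- def solution(s):
--     words = {
--         'zero': '0', 'one': '1', 'two': '2', 'three': '3', 'four': '4',
--         'five': '5', 'six': '6', 'seven': '7', 'eight': '8', 'nine': '9',
--     }
--     out = []
--     buf = ''
--     for ch in s:
--         if ch.isalpha():
--             buf += ch
--             if buf in words:
--                 out.append(words[buf])
--                 buf = ''
--         else:
--             out.append(buf)
--             out.append(ch)
--             buf = ''
--     out.append(buf)
--     return int(''.join(out))
-- ===== Notes on version B (the rewrite author's own statement) =====
-- stated objective: alternative
-- what changed: B replaces A's ten sequential whole-string replace() passes by a single left-to-right scan that buffers consecutive letters and emits a digit the moment the buffer equals a number word, flushing unmatched buffers unchanged; Pre_ excludes exactly the inputs where A's final int() raises ValueError.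
import Mathlib
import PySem

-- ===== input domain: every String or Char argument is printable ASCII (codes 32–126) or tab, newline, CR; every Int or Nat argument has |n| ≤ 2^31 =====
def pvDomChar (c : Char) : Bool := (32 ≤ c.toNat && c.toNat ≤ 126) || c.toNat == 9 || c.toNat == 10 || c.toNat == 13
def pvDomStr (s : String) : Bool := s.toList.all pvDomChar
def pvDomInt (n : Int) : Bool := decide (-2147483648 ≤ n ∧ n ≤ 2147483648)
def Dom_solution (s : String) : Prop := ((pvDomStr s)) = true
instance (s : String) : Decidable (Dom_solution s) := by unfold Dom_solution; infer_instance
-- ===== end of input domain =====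

-- B replaces A's ten sequential full-string replace() passes by a single left-to-right
-- tokenizing scan (alternative decomposition; no speed claim).

-- ===== PORT A =====
def solution (s : String) : Int :=
  let dict : PySem.Dict String String := PySem.Dict.ofList
    [("0", "zero"), ("1", "one"), ("2", "two"), ("3", "three"), ("4", "four"),
     ("5", "five"), ("6", "six"), ("7", "seven"), ("8", "eight"), ("9", "nine")]
  let s1 := dict.items.foldl
    (fun t kv => if PySem.Str.find t kv.2 ≠ -1 then PySem.Str.replace t kv.2 kv.1 else t) s
  (PySem.Int.ofStr? s1).getD 0

-- ===== PORT B =====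
def bWords : PySem.Dict (List Char) (List Char) := PySem.Dict.ofList
  [("zero".toList, "0".toList), ("one".toList, "1".toList), ("two".toList, "2".toList),
   ("three".toList, "3".toList), ("four".toList, "4".toList), ("five".toList, "5".toList),
   ("six".toList, "6".toList), ("seven".toList, "7".toList), ("eight".toList, "8".toList),
   ("nine".toList, "9".toList)]

-- the loop body of B: letters accumulate in the buffer (flushed as a digit the moment the
-- buffer is a number word), any other character flushes the buffer unchanged
def bStep (st : List (List Char) × List Char) (ch : Char) : List (List Char) × List Char :=
  if ch.isAlpha then
    let buf := st.2 ++ [ch]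
    match PySem.Dict.get? bWords buf with
    | some d => (st.1 ++ [d], [])
    | none => (st.1, buf)
  else (st.1 ++ [st.2, [ch]], [])

def solution_alt (s : String) : Int :=
  let fin := s.toList.foldl bStep ([], [])
  let out := fin.1 ++ [fin.2]
  (PySem.Int.ofChars? (PySem.Chars.join [] out)).getD 0

-- ===== PRECONDITION & SPEC =====
def isWsC (c : Char) : Bool := c == ' ' || c == '\t' || c == '\n' || c == '\r'

def nwKeys : List (List Char) :=
  ["zero".toList, "one".toList, "two".toList, "three".toList, "four".toList,
   "five".toList, "six".toList, "seven".toList, "eight".toList, "nine".toList]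

def wordRest? (ws : List (List Char)) (l : List Char) : Option (List Char) :=
  match ws with
  | [] => none
  | w :: rest => if w.isPrefixOf l then some (l.drop w.length) else wordRest? rest l

-- one item of the integer-literal grammar: a decimal digit or one of the ten number words
def itemRest? (l : List Char) : Option (List Char) :=
  match l with
  | [] => none
  | c :: t => if c.isDigit then some t else wordRest? nwKeys (c :: t)

-- after the first item: items and single underscores, then optional trailing whitespace
-- (structural recursion on the remaining length, which bounds the number of items)
def moreN : Nat → List Char → Bool
  | _, [] => true
  | 0, _ :: _ => false
  | n + 1, c :: t =>
    if isWsC c then (c :: t).all isWsC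
    else if c == '_' then
      match itemRest? t with
      | some r => moreN n r
      | none => false
    else
      match itemRest? (c :: t) with
      | some r => moreN n r
      | none => false

def moreB (l : List Char) : Bool := moreN l.length l

-- Pre_ is exactly the integer-literal grammar A's final int() accepts, with each digit
-- position allowed to be a digit character or a number word: on any other input A raises
-- ValueError (either stray characters survive the replaces, or int() rejects the string).
def preB (s : String) : Bool :=
  let l := s.toList.dropWhile isWsC
  let l2 := match l with
    | c :: t => if c == '+' || c == '-' then t else c :: t
    | [] => []
  match itemRest? l2 with
  | some r => moreB r
  | none => false

def Pre_solution (s : String) : Prop := preB s = true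
instance (s : String) : Decidable (Pre_solution s) := by unfold Pre_solution; infer_instance

def pvWitness_solution : String := "one4seveneight"

def Spec_solution (s : String) (out : Int) : Prop := out = solution_alt s
instance (s : String) (out : Int) : Decidable (Spec_solution s out) := by
  unfold Spec_solution; infer_instance

-- ===== CLAIM (what is proved, stated in full; the proofs are below) =====
def Claim_equal_solution : Prop :=
  ∀ (s : String), Dom_solution s → Pre_solution s → Spec_solution s (solution s)

-- ===== LEMMAS AND PROOFS =====

lemma wordRest?_lt {ws : List (List Char)} (hws : ∀ w ∈ ws, w ≠ []) :
    ∀ {l r : List Char}, wordRest? ws l = some r → r.length < l.length := by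
  induction ws with
  | nil => intro l r h; simp [wordRest?] at h
  | cons w rest ih =>
    intro l r h
    rw [wordRest?] at h
    split at h
    · rename_i hpre
      cases h
      have h1 : w.length ≤ l.length := (List.isPrefixOf_iff_prefix.mp hpre).length_le
      have h2 : w ≠ [] := hws w (by simp)
      have h3 : 0 < w.length := List.length_pos_iff.mpr h2
      simp only [List.length_drop]
      omega
    · exact ih (fun w hw => hws w (by simp [hw])) h

lemma itemRest?_lt {l r : List Char} (h : itemRest? l = some r) : r.length < l.length := by
  match l with
  | [] => simp [itemRest?] at h
  | c :: t =>
    rw [itemRest?] at h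
    split at h
    · cases h; simp
    · exact wordRest?_lt (by decide) h

-- (word, digit) pairs, in the order A's dict iterates
def nwPairs : List (List Char × List Char) :=
  [("zero".toList, ['0']), ("one".toList, ['1']), ("two".toList, ['2']),
   ("three".toList, ['3']), ("four".toList, ['4']), ("five".toList, ['5']),
   ("six".toList, ['6']), ("seven".toList, ['7']), ("eight".toList, ['8']),
   ("nine".toList, ['9'])]

def wTok (t : List Char) : Bool := nwKeys.contains t

-- a token is a single non-letter character or a number word
def goodTok (t : List Char) : Bool :=
  (match t with | [c] => !c.isAlpha | _ => false) || wTok t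

def GoodTs (ts : List (List Char)) : Prop := ∀ t ∈ ts, goodTok t = true

-- decoding of one token (what both programs do to it)
def decTok (t : List Char) : List Char :=
  match nwPairs.find? (fun p => p.1 == t) with
  | some p => p.2
  | none => t

-- effect of A's successive replaces on one token
def decApply (ps : List (List Char × List Char)) (t : List Char) : List Char :=
  ps.foldl (fun t q => if t = q.1 then q.2 else t) t

-- B's output chunks for one token
def decB (t : List Char) : List (List Char) :=
  if wTok t then [decTok t] else [[], t]

-- structural recursion computing s.replace(old, new) (old ≠ [])
def repS (old nu : List Char) (l : List Char) : List Char :=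
  if ho : old = [] then l else
  match l with
  | [] => []
  | c :: t =>
    if old.isPrefixOf (c :: t) then nu ++ repS old nu (List.drop old.length (c :: t))
    else c :: repS old nu t
termination_by l.length
decreasing_by
  · simp only [List.length_drop, List.length_cons]
    have : 0 < old.length := List.length_pos_iff.mpr ho
    omega
  · simp

lemma replace_go_eq (old nu : List Char) (ho : old ≠ []) :
    ∀ (fuel : Nat) (l acc : List Char), l.length ≤ fuel →
      PySem.Chars.replace.go old nu fuel l acc = acc.reverse ++ repS old nu l := by
  intro fuel
  induction fuel with
  | zero =>
    intro l acc hl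
    have : l = [] := List.eq_nil_of_length_eq_zero (by omega)
    subst this
    rw [PySem.Chars.replace.go, repS]
    simp [ho]
  | succ n ih =>
    intro l acc hl
    cases l with
    | nil => rw [PySem.Chars.replace.go, repS]; simp [ho]; omega
    | cons c t =>
      rw [PySem.Chars.replace.go, repS]
      simp only [ho, dite_false]
      by_cases hp : old.isPrefixOf (c :: t)
      · simp only [hp, if_true]
        rw [ih]
        · simp
        · have : 0 < old.length := List.length_pos_iff.mpr ho
          simp only [List.length_drop, List.length_cons]
          simp only [List.length_cons] at hl
          omega
      · simp only [hp, if_false, Bool.false_eq_true]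
        rw [ih]
        · simp
        · simp only [List.length_cons] at hl; omega

lemma replace_eq_repS (l old nu : List Char) (ho : old ≠ []) :
    PySem.Chars.replace l old nu = repS old nu l := by
  rw [PySem.Chars.replace]
  simp only [List.isEmpty_iff, ho, if_false]
  rw [replace_go_eq old nu ho l.length l [] (le_refl _)]
  simp

lemma digit_not_alpha (c : Char) (h : c.isDigit = true) : c.isAlpha = false := by
  simp only [Char.isDigit, Bool.and_eq_true, decide_eq_true_eq, ge_iff_le,
    UInt32.le_iff_toNat_le] at h
  simp only [Char.isAlpha, Char.isUpper, Char.isLower, Bool.or_eq_false_iff,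
    Bool.and_eq_false_iff, decide_eq_false_iff_not, UInt32.le_iff_toNat_le, ge_iff_le]
  have e1 : '0'.val.toNat = 48 := rfl
  have e2 : '9'.val.toNat = 57 := rfl
  have e3 : 'A'.val.toNat = 65 := rfl
  have e4 : 'Z'.val.toNat = 90 := rfl
  have e5 : 'a'.val.toNat = 97 := rfl
  have e6 : 'z'.val.toNat = 122 := rfl
  omega

-- pending suffixes that can never be a prefix of a token concatenation
def pendB (p : List Char) : Bool :=
  !p.isEmpty && p.all Char.isAlpha &&
    nwKeys.all (fun w => !(p.isPrefixOf w) && !(w.isPrefixOf p))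

lemma wTok_mem {t : List Char} (h : wTok t = true) : t ∈ nwKeys := by
  simpa [wTok] using h

lemma nw_facts : ∀ w ∈ nwKeys, w ≠ [] ∧ w.all Char.isAlpha = true ∧ 2 ≤ w.length := by decide

lemma nw_noInterior : ∀ u ∈ nwKeys, ∀ w ∈ nwKeys, ∀ i ∈ List.range u.length,
    i = 0 ∨ w.isPrefixOf (u.drop i) = false := by decide

lemma nw_pend : ∀ u ∈ nwKeys, ∀ w ∈ nwKeys, ∀ i ∈ List.range u.length,
    i = 0 ∨ u.drop i = w ∨ (u.drop i).isPrefixOf w = false ∨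
      pendB (w.drop (u.length - i)) = true := by decide

lemma nw_prefixFree : ∀ u ∈ nwKeys, ∀ w ∈ nwKeys,
    u = w ∨ (u.isPrefixOf w = false ∧ w.isPrefixOf u = false) := by decide

lemma single_tok {t : List Char}
    (h : (match t with | [c] => !c.isAlpha | _ => false) = true) :
    ∃ c, t = [c] ∧ c.isAlpha = false := by
  match t with
  | [] => simp at h
  | [c] => exact ⟨c, rfl, by simpa using h⟩
  | _ :: _ :: _ => simp at h

lemma isPrefixOf_false_iff {a b : List Char} : a.isPrefixOf b = false ↔ ¬ a <+: b := by
  rw [Bool.eq_false_iff, Ne, List.isPrefixOf_iff_prefix]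

lemma noPrefix_flatten {p : List Char} (hp : pendB p = true) :
    ∀ {ts : List (List Char)}, GoodTs ts → ¬ p <+: ts.flatten := by
  have hp' := hp
  simp only [pendB, Bool.and_eq_true, Bool.not_eq_eq_eq_not, Bool.not_true,
    List.isEmpty_eq_false_iff, List.all_eq_true] at hp'
  obtain ⟨⟨hne, halpha⟩, hword⟩ := hp'
  intro ts hts h
  cases ts with
  | nil =>
    simp only [List.flatten_nil] at h
    exact hne (List.prefix_nil.mp h)
  | cons t ts =>
    have hgt := hts t (by simp)
    simp only [goodTok, Bool.or_eq_true] at hgt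
    rw [List.flatten_cons] at h
    rcases hgt with hsingle | hwt
    · obtain ⟨c, rfl, hca⟩ := single_tok hsingle
      cases p with
      | nil => exact hne rfl
      | cons ph pt =>
        rw [List.cons_append, List.cons_prefix_cons] at h
        obtain ⟨rfl, -⟩ := h
        have := halpha ph (by simp)
        simp [this] at hca
    · have htm := wTok_mem hwt
      rcases List.prefix_or_prefix_of_prefix h (List.prefix_append t _) with h1 | h1
      · exact isPrefixOf_false_iff.mp (hword t htm).1 h1
      · exact isPrefixOf_false_iff.mp (hword t htm).2 h1

lemma noMatch_interior {u w : List Char} (hu : wTok u = true) (hw : wTok w = true)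
    {i : Nat} (h0 : 0 < i) (hl : i < u.length) {ts : List (List Char)} (hts : GoodTs ts) :
    ¬ w <+: (u.drop i ++ ts.flatten) := by
  intro h
  have hum := wTok_mem hu
  have hwm := wTok_mem hw
  have hirange : i ∈ List.range u.length := List.mem_range.mpr hl
  have hFA := nw_noInterior u hum w hwm i hirange
  have hFB := nw_pend u hum w hwm i hirange
  rcases List.prefix_or_prefix_of_prefix h (List.prefix_append _ _) with h1 | h1
  · rcases hFA with h2 | h2
    · omega
    · exact isPrefixOf_false_iff.mp h2 h1
  · -- u.drop i <+: w
    obtain ⟨x, hx⟩ := h1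
    rcases hFB with h2 | h2 | h2 | h2
    · omega
    · -- u.drop i = w, so w <+: u.drop i
      rcases hFA with h3 | h3
      · omega
      · rw [h2] at h3
        exact isPrefixOf_false_iff.mp h3 (List.prefix_refl w)
    · exact isPrefixOf_false_iff.mp h2 ⟨x, hx⟩
    · -- pending suffix can not be a prefix of the remaining tokens
      have hxval : x = w.drop (u.length - i) := by
        have h5 := congrArg (List.drop (u.drop i).length) hx
        rw [List.drop_left] at h5
        rw [h5, List.length_drop]
      rw [← hx] at h
      have h2' : x <+: ts.flatten := (List.prefix_append_right_inj (u.drop i)).mp h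
      rw [← hxval] at h2
      exact noPrefix_flatten h2 hts h2'

lemma noMatch_head {u w : List Char} (hu : wTok u = true) (hw : wTok w = true)
    (hne : u ≠ w) {ts : List (List Char)} (_hts : GoodTs ts) :
    ¬ w <+: (u ++ ts.flatten) := by
  intro h
  have hum := wTok_mem hu
  have hwm := wTok_mem hw
  rcases nw_prefixFree u hum w hwm with h1 | ⟨h1, h2⟩
  · exact hne h1
  rcases List.prefix_or_prefix_of_prefix h (List.prefix_append _ _) with h3 | h3
  · exact isPrefixOf_false_iff.mp h2 h3
  · exact isPrefixOf_false_iff.mp h1 h3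

lemma repS_skip (w nu : List Char) (hw : w ≠ []) :
    ∀ (u rest : List Char), (∀ i, i < u.length → ¬ w <+: (u.drop i ++ rest)) →
      repS w nu (u ++ rest) = u ++ repS w nu rest := by
  intro u
  induction u with
  | nil => intro rest _; simp
  | cons c u' ih =>
    intro rest hno
    rw [List.cons_append, repS]
    simp only [hw, dite_false]
    have h0 : ¬ w <+: (c :: u') ++ rest := by simpa using hno 0 (by simp)
    rw [← List.isPrefixOf_iff_prefix] at h0
    simp only [Bool.not_eq_true] at h0
    rw [List.cons_append] at h0
    simp only [h0, Bool.false_eq_true, if_false]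
    rw [ih rest (fun i hi => by simpa using hno (i + 1) (by simpa using hi))]
    simp

lemma repS_flatten (w nu : List Char) (hw : wTok w = true) :
    ∀ (ts : List (List Char)), GoodTs ts →
      repS w nu ts.flatten = (ts.map (fun t => if t = w then nu else t)).flatten := by
  have hwm := wTok_mem hw
  have hwne : w ≠ [] := (nw_facts w hwm).1
  intro ts
  induction ts with
  | nil => intro _; rw [List.flatten_nil, repS]; simp [hwne]
  | cons t ts ih =>
    intro hts
    have hts' : GoodTs ts := fun x hx => hts x (by simp [hx])
    have hgt := hts t (by simp)
    rw [List.flatten_cons, List.map_cons, List.flatten_cons]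
    by_cases htw : t = w
    · subst htw
      obtain ⟨wc, wt, rfl⟩ : ∃ c l, t = c :: l := by
        cases t with
        | nil => exact absurd rfl hwne
        | cons a b => exact ⟨a, b, rfl⟩
      rw [List.cons_append, repS]
      simp only [hwne, dite_false]
      have hpre : (wc :: wt).isPrefixOf (wc :: (wt ++ ts.flatten)) = true := by
        rw [← List.cons_append, List.isPrefixOf_iff_prefix]; exact List.prefix_append _ _
      simp only [hpre, if_true]
      rw [← List.cons_append, List.drop_left, ih hts']

    · simp only [goodTok, Bool.or_eq_true] at hgt
      rcases hgt with hsingle | hwt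
      · obtain ⟨c, rfl, hca⟩ := single_tok hsingle
        rw [List.singleton_append, repS]
        simp only [hwne, dite_false]
        have hnp : w.isPrefixOf (c :: ts.flatten) = false := by
          rw [Bool.eq_false_iff]
          intro hcon
          rw [List.isPrefixOf_iff_prefix] at hcon
          cases w with
          | nil => exact hwne rfl
          | cons a b =>
            rw [List.cons_prefix_cons] at hcon
            obtain ⟨rfl, -⟩ := hcon
            have := (nw_facts _ hwm).2.1
            simp only [List.all_cons, Bool.and_eq_true] at this
            simp [hca] at this
        simp only [hnp, Bool.false_eq_true, if_false]
        rw [ih hts', if_neg htw]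
        simp
      · have hskip := repS_skip w nu hwne t ts.flatten (by
          intro i hi
          rcases Nat.eq_zero_or_pos i with rfl | hpos
          · simpa using noMatch_head hwt hw htw hts'
          · exact noMatch_interior hwt hw hpos hi hts')
        rw [hskip, ih hts', if_neg htw]

lemma GoodTs_map (w nu : List Char) (c : Char) (hnu : nu = [c]) (hc : c.isAlpha = false)
    {ts : List (List Char)} (hts : GoodTs ts) :
    GoodTs (ts.map (fun t => if t = w then nu else t)) := by
  intro t' ht'
  rw [List.mem_map] at ht'
  obtain ⟨t, htmem, rfl⟩ := ht'
  by_cases htw : t = w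
  · simp only [htw, if_true, hnu, goodTok, hc, Bool.not_false, Bool.true_or]
  · simpa [htw] using hts t htmem

lemma infix_of_mem_flatten {t : List Char} {ts : List (List Char)} (h : t ∈ ts) :
    t <:+: ts.flatten := by
  obtain ⟨l1, l2, rfl⟩ := List.append_of_mem h
  exact ⟨l1.flatten, l2.flatten, by simp⟩

lemma A_fold :
    ∀ (ps : List (String × String)),
      (∀ p ∈ ps, wTok p.2.toList = true ∧ ∃ c, p.1.toList = [c] ∧ c.isAlpha = false) →
      ∀ (t : String) (ts : List (List Char)), GoodTs ts → t.toList = ts.flatten →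
      (ps.foldl
        (fun t kv => if PySem.Str.find t kv.2 ≠ -1 then PySem.Str.replace t kv.2 kv.1 else t)
        t).toList
      = (ts.map (decApply (ps.map (fun p => (p.2.toList, p.1.toList))))).flatten := by
  intro ps
  induction ps with
  | nil =>
    intro _ t ts hts ht
    rw [List.foldl_nil, List.map_nil, ht]
    have h1 : List.map (decApply []) ts = List.map id ts :=
      List.map_congr_left (fun a _ => rfl)
    rw [h1, List.map_id]
  | cons p ps ih =>
    intro hgood t ts hts ht
    obtain ⟨hw, c, hkey, hca⟩ := hgood p (by simp)
    have hwne : p.2.toList ≠ [] := (nw_facts _ (wTok_mem hw)).1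
    rw [List.foldl_cons]
    set g : List Char → List Char := fun tok => if tok = p.2.toList then p.1.toList else tok
      with hg
    have hts2 : GoodTs (ts.map g) := GoodTs_map _ _ c hkey hca hts
    have hstep :
        (if PySem.Str.find t p.2 ≠ -1 then PySem.Str.replace t p.2 p.1 else t).toList
          = (ts.map g).flatten := by
      by_cases hf : PySem.Str.find t p.2 ≠ -1
      · rw [if_pos hf]
        have h1 : (PySem.Str.replace t p.2 p.1).toList
            = PySem.Chars.replace t.toList p.2.toList p.1.toList := by
          simp [PySem.Str.replace]
        rw [h1, replace_eq_repS _ _ _ hwne, ht, repS_flatten _ _ hw ts hts]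
      · rw [if_neg hf]
        rw [not_ne_iff] at hf
        have hnin : ¬ p.2.toList <:+: t.toList := by
          rw [← PySem.Str.find_eq_neg_one_iff]
          exact hf
        have hmap : ts.map g = ts := by
          have h2 : List.map g ts = List.map id ts := by
            apply List.map_congr_left
            intro tok htok
            rw [hg]
            by_cases htp : tok = p.2.toList
            · exfalso
              apply hnin
              rw [ht, ← htp]
              exact infix_of_mem_flatten htok
            · simp [htp]
          rw [h2, List.map_id]
        rw [hmap, ht]
    have := ih (fun q hq => hgood q (by simp [hq])) _ (ts.map g) hts2 hstep
    rw [this, List.map_map]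
    congr 1

lemma single_ne_key {c : Char} : decApply nwPairs [c] = [c] ∧ decTok [c] = [c] ∧
    wTok [c] = false := by
  refine ⟨?_, ?_, ?_⟩ <;>
    simp [decApply, decTok, wTok, nwPairs, nwKeys, List.find?]

lemma decApply_eq_decTok {t : List Char} (h : goodTok t = true) :
    decApply nwPairs t = decTok t := by
  simp only [goodTok, Bool.or_eq_true] at h
  rcases h with hsingle | hwt
  · obtain ⟨c, rfl, -⟩ := single_tok hsingle
    rw [single_ne_key.1, single_ne_key.2.1]
  · have := wTok_mem hwt
    fin_cases this <;> decide

lemma alpha_facts : (('e'.isAlpha = true) ∧ ('f'.isAlpha = true) ∧ ('g'.isAlpha = true) ∧ ('h'.isAlpha = true) ∧ ('i'.isAlpha = true) ∧ ('n'.isAlpha = true) ∧ ('o'.isAlpha = true) ∧ ('r'.isAlpha = true) ∧ ('s'.isAlpha = true) ∧ ('t'.isAlpha = true) ∧ ('u'.isAlpha = true) ∧ ('v'.isAlpha = true) ∧ ('w'.isAlpha = true) ∧ ('x'.isAlpha = true) ∧ ('z'.isAlpha = true)) := by decide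

lemma get_facts : (PySem.Dict.get? bWords ['z'] = none ∧ PySem.Dict.get? bWords ['z', 'e'] = none ∧ PySem.Dict.get? bWords ['z', 'e', 'r'] = none ∧ PySem.Dict.get? bWords ['z', 'e', 'r', 'o'] = some ['0'] ∧ PySem.Dict.get? bWords ['o'] = none ∧ PySem.Dict.get? bWords ['o', 'n'] = none ∧ PySem.Dict.get? bWords ['o', 'n', 'e'] = some ['1'] ∧ PySem.Dict.get? bWords ['t'] = none ∧ PySem.Dict.get? bWords ['t', 'w'] = none ∧ PySem.Dict.get? bWords ['t', 'w', 'o'] = some ['2'] ∧ PySem.Dict.get? bWords ['t'] = none ∧ PySem.Dict.get? bWords ['t', 'h'] = none ∧ PySem.Dict.get? bWords ['t', 'h', 'r'] = none ∧ PySem.Dict.get? bWords ['t', 'h', 'r', 'e'] = none ∧ PySem.Dict.get? bWords ['t', 'h', 'r', 'e', 'e'] = some ['3'] ∧ PySem.Dict.get? bWords ['f'] = none ∧ PySem.Dict.get? bWords ['f', 'o'] = none ∧ PySem.Dict.get? bWords ['f', 'o', 'u'] = none ∧ PySem.Dict.get? bWords ['f', 'o', 'u', 'r'] = some ['4'] ∧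 PySem.Dict.get? bWords ['f'] = none ∧ PySem.Dict.get? bWords ['f', 'i'] = none ∧ PySem.Dict.get? bWords ['f', 'i', 'v'] = none ∧ PySem.Dict.get? bWords ['f', 'i', 'v', 'e'] = some ['5'] ∧ PySem.Dict.get? bWords ['s'] = none ∧ PySem.Dict.get? bWords ['s', 'i'] = none ∧ PySem.Dict.get? bWords ['s', 'i', 'x'] = some ['6'] ∧ PySem.Dict.get? bWords ['s'] = none ∧ PySem.Dict.get? bWords ['s', 'e'] = none ∧ PySem.Dict.get? bWords ['s', 'e', 'v'] = none ∧ PySem.Dict.get? bWords ['s', 'e', 'v', 'e'] = none ∧ PySem.Dict.get? bWords ['s', 'e', 'v', 'e', 'n'] = some ['7'] ∧ PySem.Dict.get? bWords ['e'] = none ∧ PySem.Dict.get? bWords ['e', 'i'] = none ∧ PySem.Dict.get? bWords ['e', 'i', 'g'] = none ∧ PySem.Dict.get? bWords ['e', 'i', 'g', 'h'] = none ∧ PySem.Dict.get? bWords ['e', 'i', 'g', 'h', 't'] = some ['8'] ∧ PySem.Dict.get? bWords ['n'] = none ∧ PySem.Dict.get? bWords ['n', 'i'] = none ∧ PySem.Dict.get?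 bWords ['n', 'i', 'n'] = none ∧ PySem.Dict.get? bWords ['n', 'i', 'n', 'e'] = some ['9']) := by decide

lemma toList_facts : (("zero".toList = ['z', 'e', 'r', 'o']) ∧ ("one".toList = ['o', 'n', 'e']) ∧ ("two".toList = ['t', 'w', 'o']) ∧ ("three".toList = ['t', 'h', 'r', 'e', 'e']) ∧ ("four".toList = ['f', 'o', 'u', 'r']) ∧ ("five".toList = ['f', 'i', 'v', 'e']) ∧ ("six".toList = ['s', 'i', 'x']) ∧ ("seven".toList = ['s', 'e', 'v', 'e', 'n']) ∧ ("eight".toList = ['e', 'i', 'g', 'h', 't']) ∧ ("nine".toList = ['n', 'i', 'n', 'e'])) := by decide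

lemma decTok_facts : ((decTok ['z', 'e', 'r', 'o'] = ['0']) ∧ (decTok ['o', 'n', 'e'] = ['1']) ∧ (decTok ['t', 'w', 'o'] = ['2']) ∧ (decTok ['t', 'h', 'r', 'e', 'e'] = ['3']) ∧ (decTok ['f', 'o', 'u', 'r'] = ['4']) ∧ (decTok ['f', 'i', 'v', 'e'] = ['5']) ∧ (decTok ['s', 'i', 'x'] = ['6']) ∧ (decTok ['s', 'e', 'v', 'e', 'n'] = ['7']) ∧ (decTok ['e', 'i', 'g', 'h', 't'] = ['8']) ∧ (decTok ['n', 'i', 'n', 'e'] = ['9'])) := by decide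

lemma bWordRun {t : List Char} (h : wTok t = true) :
    ∀ acc, List.foldl bStep (acc, []) t = (acc ++ [decTok t], []) := by
  have := wTok_mem h
  fin_cases this <;> intro acc <;>
    simp only [toList_facts, decTok_facts, List.foldl_cons, List.foldl_nil, bStep,
      alpha_facts, get_facts, List.nil_append, List.cons_append, if_true]

lemma bRun {ts : List (List Char)} (hts : GoodTs ts) :
    ∀ acc, List.foldl bStep (acc, []) ts.flatten = (acc ++ ts.flatMap decB, []) := by
  induction ts with
  | nil => intro acc; simp
  | cons t ts ih =>
    intro acc
    have hts' : GoodTs ts := fun x hx => hts x (by simp [hx])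
    have hgt := hts t (by simp)
    rw [List.flatten_cons, List.foldl_append]
    simp only [goodTok, Bool.or_eq_true] at hgt
    rcases hgt with hsingle | hwt
    · obtain ⟨c, rfl, hca⟩ := single_tok hsingle
      have h1 : List.foldl bStep (acc, []) [c] = (acc ++ [[], [c]], []) := by
        simp [bStep, hca]
      rw [h1, ih hts']
      have : decB [c] = [[], [c]] := by
        simp [decB, single_ne_key.2.2]
      simp [this]
    · rw [bWordRun hwt, ih hts']
      have : decB t = [decTok t] := by simp [decB, hwt]
      simp [this]

lemma flatten_flatMap_decB {ts : List (List Char)} (hts : GoodTs ts) :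
    (ts.flatMap decB).flatten = (ts.map decTok).flatten := by
  induction ts with
  | nil => rfl
  | cons t ts ih =>
    have hts' : GoodTs ts := fun x hx => hts x (by simp [hx])
    have hgt := hts t (by simp)
    rw [List.flatMap_cons, List.map_cons, List.flatten_cons, List.flatten_append, ih hts']
    simp only [goodTok, Bool.or_eq_true] at hgt
    rcases hgt with hsingle | hwt
    · obtain ⟨c, rfl, -⟩ := single_tok hsingle
      simp [decB, single_ne_key.2.2, single_ne_key.2.1]
    · simp [decB, hwt]

lemma join_nil_flatten (ps : List (List Char)) : PySem.Chars.join [] ps = ps.flatten := by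
  rw [PySem.Chars.join]
  induction ps with
  | nil => rfl
  | cons a l ih =>
    cases l with
    | nil => simp [List.intercalate]
    | cons b m =>
      rw [List.flatten_cons, ← ih]
      simp [List.intercalate]

-- Pre_ ⇒ the input splits into good tokens
lemma wordRest?_some {ws : List (List Char)} :
    ∀ {l r : List Char}, wordRest? ws l = some r → ∃ w ∈ ws, l = w ++ r := by
  induction ws with
  | nil => intro l r h; simp [wordRest?] at h
  | cons w rest ih =>
    intro l r h
    rw [wordRest?] at h
    split at h
    · rename_i hpre
      cases h
      obtain ⟨x, rfl⟩ := List.isPrefixOf_iff_prefix.mp hpre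
      exact ⟨w, by simp, by rw [List.drop_left]⟩
    · obtain ⟨w', hmem, heq⟩ := ih h
      exact ⟨w', by simp [hmem], heq⟩

lemma item_decomp {l r : List Char} (h : itemRest? l = some r) :
    ∃ t, goodTok t = true ∧ l = t ++ r := by
  match l with
  | [] => simp [itemRest?] at h
  | c :: t =>
    rw [itemRest?] at h
    split at h
    · rename_i hd
      cases h
      exact ⟨[c], by simp [goodTok, digit_not_alpha c hd], rfl⟩
    · obtain ⟨w, hmem, heq⟩ := wordRest?_some h
      refine ⟨w, ?_, heq⟩
      simp [goodTok, wTok, hmem]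

lemma singletons_decomp {l : List Char} (h : ∀ c ∈ l, c.isAlpha = false) :
    ∃ ts, GoodTs ts ∧ l = ts.flatten := by
  refine ⟨l.map (fun c => [c]), ?_, ?_⟩
  · intro t ht
    rw [List.mem_map] at ht
    obtain ⟨c, hc, rfl⟩ := ht
    simp [goodTok, h c hc]
  · rw [← List.flatMap_def, List.flatMap_singleton']

lemma ws_not_alpha {c : Char} (h : isWsC c = true) : c.isAlpha = false := by
  simp only [isWsC, Bool.or_eq_true, beq_iff_eq] at h
  rcases h with ((rfl | rfl) | rfl) | rfl <;> decide

lemma GoodTs_append {ts1 ts2 : List (List Char)} (h1 : GoodTs ts1) (h2 : GoodTs ts2) :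
    GoodTs (ts1 ++ ts2) := by
  intro t ht
  rcases List.mem_append.mp ht with h | h
  · exact h1 t h
  · exact h2 t h

lemma moreB_decomp : ∀ (n : Nat) (l : List Char), l.length ≤ n → moreN n l = true →
    ∃ ts, GoodTs ts ∧ l = ts.flatten := by
  intro n
  induction n with
  | zero =>
    intro l hl _
    have : l = [] := List.eq_nil_of_length_eq_zero (by omega)
    exact ⟨[], by simp [GoodTs], by simp [this]⟩
  | succ n ih =>
    intro l hl hm
    cases l with
    | nil => exact ⟨[], by simp [GoodTs], by simp⟩
    | cons c t =>
      rw [moreN] at hm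
      split_ifs at hm with hws hund
      · -- trailing whitespace
        rw [List.all_eq_true] at hm
        exact singletons_decomp (fun x hx => ws_not_alpha (hm x hx))
      · -- underscore then an item
        rcases hit : itemRest? t with _ | r
        · rw [hit] at hm; simp at hm
        · rw [hit] at hm
          obtain ⟨tok, htok, rfl⟩ := item_decomp hit
          have hlen : r.length ≤ n := by
            have := itemRest?_lt hit
            simp only [List.length_cons] at hl
            omega
          obtain ⟨ts, hts, rfl⟩ := ih r hlen hm
          have hc : c = '_' := by simpa using hund
          refine ⟨[c] :: tok :: ts, ?_, by simp⟩
          intro x hx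
          rcases hx with _ | ⟨_, hx⟩
          · simp [goodTok, hc]
          · rcases hx with _ | ⟨_, hx⟩
            · exact htok
            · exact hts x hx
      · -- an item directly
        rcases hit : itemRest? (c :: t) with _ | r
        · rw [hit] at hm; simp at hm
        · rw [hit] at hm
          obtain ⟨tok, htok, heq⟩ := item_decomp hit
          have hlen : r.length ≤ n := by
            have h9 := itemRest?_lt hit
            simp only [List.length_cons] at hl h9
            omega
          obtain ⟨ts, hts, rfl⟩ := ih r hlen hm
          refine ⟨tok :: ts, ?_, by simp [heq]⟩
          intro x hx
          rcases hx with _ | ⟨_, hx⟩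
          · exact htok
          · exact hts x hx

lemma pre_decomp {s : String} (h : preB s = true) :
    ∃ ts, GoodTs ts ∧ s.toList = ts.flatten := by
  rw [preB] at h
  have hsplit : s.toList = s.toList.takeWhile isWsC ++ s.toList.dropWhile isWsC :=
    (List.takeWhile_append_dropWhile).symm
  obtain ⟨ts0, hts0, hw0⟩ : ∃ ts, GoodTs ts ∧ s.toList.takeWhile isWsC = ts.flatten :=
    singletons_decomp (fun c hc => ws_not_alpha (List.mem_takeWhile_imp hc))
  -- the rest after optional whitespace
  rcases hdw : s.toList.dropWhile isWsC with _ | ⟨c, t⟩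
  · rw [hdw] at h
    simp only at h
    rcases hit : itemRest? [] with _ | r
    · rw [hit] at h; simp at h
    · simp [itemRest?] at hit
  · rw [hdw] at h
    simp only at h
    by_cases hsign : (c == '+' || c == '-') = true
    · rw [if_pos hsign] at h
      rcases hit : itemRest? t with _ | r
      · rw [hit] at h; simp at h
      · rw [hit] at h
        obtain ⟨tok, htok, rfl⟩ := item_decomp hit
        obtain ⟨ts1, hts1, rfl⟩ := moreB_decomp r.length r (le_refl _) (by unfold moreB at h; exact h)
        refine ⟨ts0 ++ [c] :: tok :: ts1, ?_, ?_⟩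
        · refine GoodTs_append hts0 ?_
          intro x hx
          rcases hx with _ | ⟨_, hx⟩
          · simp only [Bool.or_eq_true, beq_iff_eq] at hsign
            rcases hsign with rfl | rfl <;> simp [goodTok]
          · rcases hx with _ | ⟨_, hx⟩
            · exact htok
            · exact hts1 x hx
        · rw [hsplit, hdw, hw0]
          simp
    · rw [if_neg hsign] at h
      rcases hit : itemRest? (c :: t) with _ | r
      · rw [hit] at h; simp at h
      · rw [hit] at h
        obtain ⟨tok, htok, heq⟩ := item_decomp hit
        obtain ⟨ts1, hts1, hr⟩ := moreB_decomp r.length r (le_refl _) (by unfold moreB at h; exact h)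
        refine ⟨ts0 ++ tok :: ts1, ?_, ?_⟩
        · refine GoodTs_append hts0 ?_
          intro x hx
          rcases hx with _ | ⟨_, hx⟩
          · exact htok
          · exact hts1 x hx
        · rw [hsplit, hdw, hw0, heq, hr]
          simp

lemma A_pairs_good : ∀ p ∈ ([("0", "zero"), ("1", "one"), ("2", "two"), ("3", "three"), ("4", "four"), ("5", "five"), ("6", "six"), ("7", "seven"), ("8", "eight"), ("9", "nine")] : List (String × String)),
    wTok p.2.toList = true ∧ ∃ c, p.1.toList = [c] ∧ c.isAlpha = false := by
  intro p hp
  fin_cases hp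
  · exact ⟨by decide, '0', by decide, by decide⟩
  · exact ⟨by decide, '1', by decide, by decide⟩
  · exact ⟨by decide, '2', by decide, by decide⟩
  · exact ⟨by decide, '3', by decide, by decide⟩
  · exact ⟨by decide, '4', by decide, by decide⟩
  · exact ⟨by decide, '5', by decide, by decide⟩
  · exact ⟨by decide, '6', by decide, by decide⟩
  · exact ⟨by decide, '7', by decide, by decide⟩
  · exact ⟨by decide, '8', by decide, by decide⟩
  · exact ⟨by decide, '9', by decide, by decide⟩

-- ===== VERDICT =====
theorem solution_spec : Claim_equal_solution := by
  intro s hdom hpre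
  unfold Spec_solution
  obtain ⟨ts, hts, hdec⟩ := pre_decomp hpre
  have hA := A_fold _ A_pairs_good s ts hts hdec
  have hPS : (([("0", "zero"), ("1", "one"), ("2", "two"), ("3", "three"), ("4", "four"), ("5", "five"), ("6", "six"), ("7", "seven"), ("8", "eight"), ("9", "nine")] : List (String × String)).map
      (fun p => (p.2.toList, p.1.toList))) = nwPairs := by decide
  rw [hPS] at hA
  have hmapd : List.map (decApply nwPairs) ts = List.map decTok ts :=
    List.map_congr_left (fun t ht => decApply_eq_decTok (hts t ht))
  rw [hmapd] at hA
  have hAside : solution s = (PySem.Int.ofChars? ((ts.map decTok).flatten)).getD 0 := by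
    show (PySem.Int.ofStr? (([("0", "zero"), ("1", "one"), ("2", "two"), ("3", "three"), ("4", "four"), ("5", "five"), ("6", "six"), ("7", "seven"), ("8", "eight"), ("9", "nine")] : List (String × String)).foldl
      (fun t kv => if PySem.Str.find t kv.2 ≠ -1 then PySem.Str.replace t kv.2 kv.1 else t)
      s)).getD 0 = _
    rw [PySem.Int.ofStr?, hA]
  have hBside : solution_alt s = (PySem.Int.ofChars? ((ts.map decTok).flatten)).getD 0 := by
    show (PySem.Int.ofChars? (PySem.Chars.join []
      ((s.toList.foldl bStep ([], [])).1 ++ [(s.toList.foldl bStep ([], [])).2]))).getD 0 = _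
    rw [hdec, bRun hts []]
    simp only [List.nil_append]
    rw [join_nil_flatten, List.flatten_append]
    simp only [List.flatten_cons, List.flatten_nil, List.append_nil]
    rw [flatten_flatMap_decB hts]
  rw [hAside, hBside]
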